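-- pv_equiv track=rewrite | github.com/qypea/nongram-solver | nono.py | generate_row_options
-- ===== SOURCE A (Python) =====
-- import enum
--
-- class Square(enum.IntEnum):
--     """Enum for the state of a single square."""
--
--     UNKNOWN = 0
--     EMPTY = 1
--     FULL = 2
--
-- def generate_row_options(state: list):
--     """Generate all possible permutations of a row given the current state."""
--     state = state.copy()
--     try:
--         i = list(state).index(Square.UNKNOWN)
--     except ValueError:
--         yield state
--         return
--
--     state[i] = Square.EMPTY
--     for derived in generate_row_options(state):
--         yield derived
--     state[i] = Square.FULL
--     for derived in generate_row_options(state):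
--         yield derived
--     state[i] = Square.UNKNOWN
-- ===== SOURCE B (Python) =====
-- import enum
-- import itertools
--
--
-- class Square(enum.IntEnum):
--     """Enum for the state of a single square."""
--
--     UNKNOWN = 0
--     EMPTY = 1
--     FULL = 2
--
--
-- def generate_row_options(state: list):
--     """Generate all possible permutations of a row given the current state."""
--     idxs = [i for i, v in enumerate(state) if v == Square.UNKNOWN]
--     for combo in itertools.product([Square.EMPTY, Square.FULL], repeat=len(idxs)):
--         out = state.copy()
--         for i, v in zip(idxs, combo):
--             out[i] = v
--         yield out
-- ===== Notes on version B (the rewrite author's own statement) =====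
-- stated objective: alternative
-- what changed: Replaces A's recursive generator (recurse on the first UNKNOWN, mutating it to EMPTY then FULL) by a flat enumeration: collect the unknown indices once, then iterate itertools.product over them, writing each combination into a fresh copy of the row.
import Mathlib
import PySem

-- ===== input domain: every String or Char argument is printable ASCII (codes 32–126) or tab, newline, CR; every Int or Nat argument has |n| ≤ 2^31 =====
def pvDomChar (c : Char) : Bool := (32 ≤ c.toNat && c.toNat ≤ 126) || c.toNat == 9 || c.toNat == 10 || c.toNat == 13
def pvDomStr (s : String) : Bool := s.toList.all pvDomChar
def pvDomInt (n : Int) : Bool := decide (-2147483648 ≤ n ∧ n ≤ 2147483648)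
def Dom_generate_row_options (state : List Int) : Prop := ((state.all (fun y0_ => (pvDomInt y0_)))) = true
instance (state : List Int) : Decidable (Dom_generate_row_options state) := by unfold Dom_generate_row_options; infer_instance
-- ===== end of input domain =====

-- B replaces A's recursive generator (recurse on first UNKNOWN, try EMPTY then FULL) by a flat
-- enumeration: collect unknown indices once and iterate itertools.product over them (alternative).


-- ===== PORT A =====
-- termination helper: setting the first 0 to a nonzero value strictly decreases the number of 0s
theorem pv_count_set_lt (s : List Int) (i : Nat) (v : Int) (hv : v ≠ 0)
    (h : PySem.List.index? s 0 = some i) : (s.set i v).count 0 < s.count 0 := by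
  obtain ⟨pre, suf, rfl, rfl, hnp⟩ := (PySem.List.index?_eq_some_iff _ _ _).mp h
  have hset : (pre ++ (0 : Int) :: suf).set pre.length v = pre ++ v :: suf := by
    induction pre with
    | nil => simp
    | cons a pre ih => simpa using ih
  rw [hset]
  simp [List.count_append, List.count_cons, hv]

-- A: recurse on the first UNKNOWN square, trying EMPTY (1) then FULL (2)
def generate_row_options (state : List Int) : List (List Int) :=
  match h : PySem.List.index? state 0 with
  | none => [state]
  | some i =>
      generate_row_options (state.set i 1) ++ generate_row_options (state.set i 2)
termination_by state.count 0
decreasing_by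
  · exact pv_count_set_lt state i 1 (by decide) h
  · exact pv_count_set_lt state i 2 (by decide) h

-- ===== PORT B =====
-- indices of UNKNOWN squares (as in Source B's enumerate comprehension)
def pvZeros (state : List Int) : List Int :=
  ((PySem.List.enumerate state).filter (fun p => p.2 == 0)).map (·.1)

-- itertools.product([EMPTY, FULL], repeat = n): first coordinate varies slowest
def pvCombos : Nat → List (List Int)
  | 0 => [[]]
  | n + 1 => ([1, 2] : List Int).flatMap (fun v => (pvCombos n).map (fun c => v :: c))

def pvWrite (s : List Int) (p : Int × Int) : List Int := s.set p.1.toNat p.2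

def generate_row_options_alt (state : List Int) : List (List Int) :=
  let idxs := pvZeros state
  (pvCombos idxs.length).map (fun c => (idxs.zip c).foldl pvWrite state)

-- ===== PRECONDITION & SPEC =====
def Spec_generate_row_options (state : List Int) (out : List (List Int)) : Prop := out = generate_row_options_alt state
instance (state : List Int) (out : List (List Int)) : Decidable (Spec_generate_row_options state out) := by unfold Spec_generate_row_options; infer_instance

-- ===== CLAIM (what is proved, stated in full; the proofs are below) =====
def Claim_equal_generate_row_options : Prop := ∀ (state : List Int), Dom_generate_row_options state → Spec_generate_row_options state (generate_row_options state)

-- ===== LEMMAS AND PROOFS =====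

-- no zeros: B yields exactly the original row
theorem pvZeros_eq_nil (s : List Int) (h : (0 : Int) ∉ s) : pvZeros s = [] := by
  unfold pvZeros
  rw [List.filter_eq_nil_iff.mpr, List.map_nil]
  intro p hp hc
  obtain ⟨k, hk, rfl⟩ := (PySem.List.mem_enumerate_iff _ _ _).mp hp
  apply h
  have h2 : s[k] = 0 := by simpa using hc
  exact h2 ▸ List.getElem_mem hk

-- decomposing at the first zero: pvZeros of every variant agrees past the head
theorem pvZeros_decomp (pre suf : List Int) (hnp : (0 : Int) ∉ pre) (v : Int) (hv : v ≠ 0) :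
    pvZeros (pre ++ (0 : Int) :: suf) = (pre.length : Int) :: pvZeros (pre ++ v :: suf) := by
  unfold pvZeros
  rw [PySem.List.enumerate_append, PySem.List.enumerate_append,
      PySem.List.enumerate_cons, PySem.List.enumerate_cons]
  have hpre : ∀ s : Int, (PySem.List.enumerate pre s).filter (fun p => p.2 == 0) = [] := by
    intro s
    apply List.filter_eq_nil_iff.mpr
    intro p hp hc
    obtain ⟨k, hk, rfl⟩ := (PySem.List.mem_enumerate_iff _ _ _).mp hp
    apply hnp
    have h2 : pre[k] = 0 := by simpa using hc
    exact h2 ▸ List.getElem_mem hk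
  simp [List.filter_append, hpre, hv]

theorem pv_set_at (pre suf : List Int) (x v : Int) :
    (pre ++ x :: suf).set pre.length v = pre ++ v :: suf := by
  induction pre with
  | nil => simp
  | cons a pre ih => simpa using ih

-- unfolding lemmas for A's dependent match
theorem gro_none (s : List Int) (h : PySem.List.index? s 0 = none) :
    generate_row_options s = [s] := by
  rw [generate_row_options]; split
  · rfl
  · rename_i i heq
    rw [PySem.List.index?_eq_idxOf?] at h
    simp [h] at heq

theorem gro_some (s : List Int) (i : Nat) (h : PySem.List.index? s 0 = some i) :
    generate_row_options s
      = generate_row_options (s.set i 1) ++ generate_row_options (s.set i 2) := by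
  rw [generate_row_options]; split <;> simp_all

-- main equivalence, by strong induction on the number of zeros
theorem pv_main (s : List Int) : generate_row_options s = generate_row_options_alt s := by
  generalize hn : s.count 0 = n
  induction n using Nat.strong_induction_on generalizing s with
  | _ n ih =>
  cases h : PySem.List.index? s 0 with
  | none =>
      have h0 : (0 : Int) ∉ s := (PySem.List.index?_eq_none_iff _ _).mp h
      simp [gro_none s h, generate_row_options_alt, pvZeros_eq_nil s h0, pvCombos]
  | some i =>
      rw [gro_some _ _ h]
      obtain ⟨pre, suf, rfl, rfl, hnp⟩ := (PySem.List.index?_eq_some_iff _ _ _).mp h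
      subst hn
      have hlt1 := pv_count_set_lt _ _ 1 (by decide) h
      have hlt2 := pv_count_set_lt _ _ 2 (by decide) h
      rw [ih _ hlt1 _ rfl, ih _ hlt2 _ rfl]
      rw [pv_set_at, pv_set_at]
      have hz1 := pvZeros_decomp pre suf hnp 1 (by decide)
      have hz2 := pvZeros_decomp pre suf hnp 2 (by decide)
      have hzz : pvZeros (pre ++ (1 : Int) :: suf) = pvZeros (pre ++ (2 : Int) :: suf) := by
        have := hz1.symm.trans hz2
        exact List.cons.inj this |>.2
      unfold generate_row_options_alt
      rw [hz1, hzz]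
      simp only [pvCombos, List.length_cons, List.flatMap_cons, List.flatMap_nil,
        List.map_append, List.map_map, List.append_nil]
      congr 1 <;>
      · apply List.map_congr_left
        intro c hc
        simp [Function.comp, List.zip_cons_cons, pvWrite]

-- ===== VERDICT (by name: the statement is the Claim_ definition above) =====
theorem generate_row_options_spec : Claim_equal_generate_row_options := by
  intro s _
  exact pv_main s
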